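-- pv_equiv track=rewrite | github.com/HeleneRL/my-project | libs/dasprocessor/bearing_tools.py | packet_coverage_counts
-- ===== SOURCE A (Python) =====
-- from typing import Dict, Iterable, List, Mapping, Optional, Sequence, Tuple, Union
--
-- def packet_coverage_counts(
--     arrivals: Mapping[int, Mapping[int, int]],
--     subarrays: Mapping[int, Sequence[int]],
--     packet_indices: Optional[Iterable[int]] = None
-- ) -> Dict[int, int]:
--     """
--     Count how many subarrays have >=1 detection (in any element) for each packet.
--
--     Returns
--     -------
--     {packet_idx: count_of_subarrays_with_at_least_one_detection}
--     """
--     # build set of packets to consider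
--     if packet_indices is None:
--         pk_all = set()
--         for ch_map in arrivals.values():
--             pk_all.update(ch_map.keys())
--         packet_indices = sorted(pk_all)
--
--     coverage: Dict[int, int] = {int(k): 0 for k in packet_indices}
--     for _, chans in subarrays.items():
--         present = set()
--         for ch in chans:
--             present.update(arrivals.get(ch, {}).keys())
--         for k in present:
--             if k in coverage:
--                 coverage[int(k)] += 1
--     return coverage
-- ===== SOURCE B (Python) =====
-- def packet_coverage_counts(arrivals, subarrays, packet_indices=None):
--     # Inverted index: packet -> set of channels that detected it, built once.
--     by_packet = {}
--     for ch, ch_map in arrivals.items():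
--         for k in ch_map:
--             by_packet.setdefault(k, set()).add(ch)
--     if packet_indices is None:
--         packet_indices = sorted(by_packet)
--     chan_lists = list(subarrays.values())
--     return {int(k): sum(1 for chans in chan_lists
--                         if any(ch in by_packet.get(k, ()) for ch in chans))
--             for k in packet_indices}
-- ===== Notes on version B (the rewrite author's own statement) =====
-- stated objective: alternative
-- what changed: B inverts arrivals once into a packet->channel-set index and builds the result dict directly, computing each packet's count as the number of subarrays whose channel list meets that packet's channel set; A instead mutates a zero-initialized coverage dict, building a per-subarray 'present' union set and bumping matching keys. B trades A's per-subarray union for per-packet membership scans, which is slower when there are many packets.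
import Mathlib
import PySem

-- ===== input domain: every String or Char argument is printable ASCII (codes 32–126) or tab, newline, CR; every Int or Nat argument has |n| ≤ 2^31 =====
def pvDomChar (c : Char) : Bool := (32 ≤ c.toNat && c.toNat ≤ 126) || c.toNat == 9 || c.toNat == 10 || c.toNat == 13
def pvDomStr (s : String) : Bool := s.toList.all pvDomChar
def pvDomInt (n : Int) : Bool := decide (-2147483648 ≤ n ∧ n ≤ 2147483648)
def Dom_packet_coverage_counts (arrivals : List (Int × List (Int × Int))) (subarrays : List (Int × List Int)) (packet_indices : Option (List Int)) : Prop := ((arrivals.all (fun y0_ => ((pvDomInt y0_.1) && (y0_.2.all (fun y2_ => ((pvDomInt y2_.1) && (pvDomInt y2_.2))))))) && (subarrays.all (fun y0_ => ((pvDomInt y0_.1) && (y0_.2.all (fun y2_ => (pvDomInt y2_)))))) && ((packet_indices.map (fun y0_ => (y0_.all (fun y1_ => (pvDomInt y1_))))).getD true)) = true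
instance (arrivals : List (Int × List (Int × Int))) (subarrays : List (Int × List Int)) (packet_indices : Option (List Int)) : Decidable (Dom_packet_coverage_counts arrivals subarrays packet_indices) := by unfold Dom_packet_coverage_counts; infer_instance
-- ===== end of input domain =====

-- B inverts arrivals once into a packet -> channel-set index and builds the result dict directly
-- (count = subarrays whose channels meet the packet's channel set), instead of A's mutated
-- zero-initialized coverage dict bumped via a per-subarray 'present' union set — an alternative
-- algorithm of similar cost; equal return value is proved below (neither mutates its arguments).

-- ===== PORT A =====
def packet_coverage_counts (arrivals : List (Int × List (Int × Int))) (subarrays : List (Int × List Int)) (packet_indices : Option (List Int)) : List (Int × Int) :=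
  let arr : PySem.Dict Int (List (Int × Int)) := PySem.Dict.ofList arrivals
  let subs : PySem.Dict Int (List Int) := PySem.Dict.ofList subarrays
  -- if packet_indices is None: pk_all = union of the keys of every channel map; packet_indices = sorted(pk_all)
  let pks : List Int :=
    match packet_indices with
    | some l => l
    | none =>
        let pk_all : PySem.Set Int :=
          arr.values.foldl (fun s ch_map => PySem.Set.update s (PySem.Dict.ofList ch_map).keys) PySem.Set.empty
        PySem.List.sorted pk_all (fun x => x) false
  -- coverage = {int(k): 0 for k in packet_indices}
  let cov0 : PySem.Dict Int Int := pks.foldl (fun d k => d.insert k 0) PySem.Dict.empty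
  -- for _, chans in subarrays.items(): build 'present', then bump every present key of coverage
  -- ('for k in present' iterates a Python set: the counting result is order-independent)
  let cov : PySem.Dict Int Int := subs.items.foldl (fun cov p =>
      let present : PySem.Set Int :=
        p.2.foldl (fun s ch => PySem.Set.update s (PySem.Dict.ofList ((arr.get? ch).getD [])).keys) PySem.Set.empty
      present.foldl (fun c k => if c.contains k then c.modify k 0 (· + 1) else c) cov) cov0
  cov.items

-- ===== PORT B =====
def packet_coverage_counts_alt (arrivals : List (Int × List (Int × Int))) (subarrays : List (Int × List Int)) (packet_indices : Option (List Int)) : List (Int × Int) :=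
  let arr : PySem.Dict Int (List (Int × Int)) := PySem.Dict.ofList arrivals
  let subs : PySem.Dict Int (List Int) := PySem.Dict.ofList subarrays
  -- by_packet: packet -> set of channels that detected it (setdefault(k, set()).add(ch) = modify with empty default)
  let by_packet : PySem.Dict Int (PySem.Set Int) :=
    arr.items.foldl (fun d p =>
      (PySem.Dict.ofList p.2).keys.foldl
        (fun d k => d.modify k PySem.Set.empty (fun s => PySem.Set.add s p.1)) d) PySem.Dict.empty
  let pks : List Int :=
    match packet_indices with
    | some l => l
    | none => PySem.List.sorted by_packet.keys (fun x => x) false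
  let chan_lists : List (List Int) := subs.values
  -- {int(k): sum(1 for chans in chan_lists if any(ch in by_packet.get(k, ()) for ch in chans)) for k in packet_indices}
  (pks.foldl (fun d k =>
      d.insert k
        ((chan_lists.countP (fun chans =>
            chans.any (fun ch => (by_packet.getD k PySem.Set.empty).contains ch)) : Int)))
    PySem.Dict.empty).items

-- ===== PRECONDITION & SPEC =====
def Spec_packet_coverage_counts (arrivals : List (Int × List (Int × Int))) (subarrays : List (Int × List Int)) (packet_indices : Option (List Int)) (out : List (Int × Int)) : Prop := out = packet_coverage_counts_alt arrivals subarrays packet_indices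
instance (arrivals : List (Int × List (Int × Int))) (subarrays : List (Int × List Int)) (packet_indices : Option (List Int)) (out : List (Int × Int)) : Decidable (Spec_packet_coverage_counts arrivals subarrays packet_indices out) := by unfold Spec_packet_coverage_counts; infer_instance

-- ===== CLAIM (what is proved, stated in full; the proofs are below) =====
def Claim_equal_packet_coverage_counts : Prop := ∀ (arrivals : List (Int × List (Int × Int))) (subarrays : List (Int × List Int)) (packet_indices : Option (List Int)), Dom_packet_coverage_counts arrivals subarrays packet_indices → Spec_packet_coverage_counts arrivals subarrays packet_indices (packet_coverage_counts arrivals subarrays packet_indices)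

-- ===== LEMMAS AND PROOFS =====

theorem pv_inner_getD (x : Int) (ks : List Int) (k : Int) :
    ∀ d : PySem.Dict Int (PySem.Set Int),
    (ks.foldl (fun d kk => d.modify kk PySem.Set.empty (fun s => PySem.Set.add s x)) d).getD k PySem.Set.empty
      = if k ∈ ks then PySem.Set.add (d.getD k PySem.Set.empty) x else d.getD k PySem.Set.empty := by
  induction ks with
  | nil => intro d; simp
  | cons a t ih =>
      intro d
      simp only [List.foldl_cons, ih, PySem.Dict.getD_modify, List.mem_cons]
      by_cases hka : k = a
      · subst hka
        by_cases hkt : k ∈ t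
        · simp only [hkt, if_true, true_or]
          simp only [PySem.Set.add, PySem.Set.contains]
          by_cases h : (d.getD k PySem.Set.empty).contains x = true <;>
            simp_all [PySem.Set.contains]
        · simp [hkt]
      · simp [hka]

-- membership of ch in the inner-fold getD
theorem pv_inner_mem (x : Int) (ks : List Int) (k ch : Int) (d : PySem.Dict Int (PySem.Set Int)) :
    (ch ∈ (ks.foldl (fun d kk => d.modify kk PySem.Set.empty (fun s => PySem.Set.add s x)) d).getD k PySem.Set.empty)
      ↔ ch ∈ d.getD k PySem.Set.empty ∨ (k ∈ ks ∧ ch = x) := by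
  rw [pv_inner_getD]
  by_cases h : k ∈ ks
  · simp [h, PySem.Set.mem_add]
  · simp [h]

-- keys of the whole by_packet build = A's pk_all union fold
theorem pv_bp_keys (items : List (Int × List (Int × Int))) :
    ∀ d : PySem.Dict Int (PySem.Set Int),
    (items.foldl (fun d p =>
        (PySem.Dict.ofList p.2).keys.foldl
          (fun d k => d.modify k PySem.Set.empty (fun s => PySem.Set.add s p.1)) d) d).keys
      = items.foldl (fun s p => PySem.Set.update s (PySem.Dict.ofList p.2).keys) d.keys := by
  induction items with
  | nil => intro d; rfl
  | cons q t ih =>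
      intro d
      simp only [List.foldl_cons, ih]
      rw [PySem.Dict.keys_foldl_modify _ _ (fun _ _ => fun s => PySem.Set.add s q.1)]

-- membership in by_packet's set for packet k
theorem pv_bp_mem (items : List (Int × List (Int × Int))) (k ch : Int) :
    ∀ d : PySem.Dict Int (PySem.Set Int),
    (ch ∈ (items.foldl (fun d p =>
        (PySem.Dict.ofList p.2).keys.foldl
          (fun d k => d.modify k PySem.Set.empty (fun s => PySem.Set.add s p.1)) d) d).getD k PySem.Set.empty)
      ↔ ch ∈ d.getD k PySem.Set.empty ∨ ∃ p ∈ items, p.1 = ch ∧ k ∈ (PySem.Dict.ofList p.2).keys := by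
  induction items with
  | nil => intro d; simp
  | cons q t ih =>
      intro d
      simp only [List.foldl_cons, ih, pv_inner_mem, List.mem_cons]
      constructor
      · rintro ((h | ⟨hk, rfl⟩) | ⟨p, hp, h1, h2⟩)
        · exact Or.inl h
        · exact Or.inr ⟨q, Or.inl rfl, rfl, hk⟩
        · exact Or.inr ⟨p, Or.inr hp, h1, h2⟩
      · rintro (h | ⟨p, (rfl | hp), h1, h2⟩)
        · exact Or.inl (Or.inl h)
        · exact Or.inl (Or.inr ⟨h2, h1.symm⟩)
        · exact Or.inr ⟨p, hp, h1, h2⟩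


-- B's membership test equals A's arrival-key test, for a dict with unique keys
theorem pv_bp_contains (arr : PySem.Dict Int (List (Int × Int))) (h : arr.keys.Nodup) (k ch : Int) :
    ((arr.items.foldl (fun d p =>
        (PySem.Dict.ofList p.2).keys.foldl
          (fun d k => d.modify k PySem.Set.empty (fun s => PySem.Set.add s p.1)) d)
        PySem.Dict.empty).getD k PySem.Set.empty).contains ch
      = decide (k ∈ (PySem.Dict.ofList ((arr.get? ch).getD [])).keys) := by
  have hm := pv_bp_mem arr.items k ch PySem.Dict.empty
  simp only [PySem.Dict.getD_empty, PySem.Set.empty, List.not_mem_nil, false_or] at hm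
  have hiff : (∃ p ∈ arr.items, p.1 = ch ∧ k ∈ (PySem.Dict.ofList p.2).keys)
      ↔ k ∈ (PySem.Dict.ofList ((arr.get? ch).getD [])).keys := by
    constructor
    · rintro ⟨⟨c, m⟩, hp, rfl, h2⟩
      rw [PySem.Dict.get?_of_mem_items arr hp h]
      exact h2
    · intro hk
      cases hg : arr.get? ch with
      | none =>
          rw [hg] at hk
          exact absurd hk (by simp [PySem.Dict.ofList, PySem.Dict.update, PySem.Dict.keys, PySem.Dict.empty])
      | some m =>
          rw [hg] at hk
          exact ⟨(ch, m), PySem.Dict.mem_items_of_get?_eq_some arr hg, rfl, hk⟩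
  set S := ((arr.items.foldl (fun d p =>
        (PySem.Dict.ofList p.2).keys.foldl
          (fun d k => d.modify k PySem.Set.empty (fun s => PySem.Set.add s p.1)) d)
        PySem.Dict.empty).getD k PySem.Set.empty) with hS
  have hcm : S.contains ch = true ↔ ch ∈ S := by
    simp [PySem.Set.contains]
  by_cases hb : S.contains ch = true
  · rw [hb, eq_comm, decide_eq_true_eq]
    exact hiff.mp (hm.mp (hcm.mp hb))
  · rw [Bool.not_eq_true] at hb
    rw [hb, eq_comm, decide_eq_false_iff_not]
    exact fun hk => (Bool.not_eq_true _ ▸ hb : ¬ S.contains ch = true) (hcm.mpr (hm.mpr (hiff.mpr hk)))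

-- updating a set with elements it already holds leaves it unchanged
theorem pv_update_of_subset (s : PySem.Set Int) (l : List Int) (h : ∀ x ∈ l, x ∈ s) :
    PySem.Set.update s l = s := by
  induction l generalizing s with
  | nil => rfl
  | cons a t ih =>
      have ha : PySem.Set.add s a = s := by
        simp [PySem.Set.add, PySem.Set.contains, h a (by simp)]
      show PySem.Set.update (PySem.Set.add s a) t = s
      rw [ha]
      exact ih s (fun x hx => h x (by simp [hx]))

-- a fold of Set.update steps from a duplicate-free start stays duplicate-free
theorem pv_foldl_update_nodup (g : Int → List Int) (cs : List Int) (s : PySem.Set Int)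
    (h : s.Nodup) : (cs.foldl (fun s c => PySem.Set.update s (g c)) s).Nodup := by
  induction cs generalizing s with
  | nil => exact h
  | cons a t ih => exact ih _ (PySem.Set.nodup_update s (g a) h)

-- membership in a fold of Set.update steps
theorem pv_foldl_update_mem (g : Int → List Int) (cs : List Int) (s : PySem.Set Int) (y : Int) :
    y ∈ cs.foldl (fun s c => PySem.Set.update s (g c)) s ↔ y ∈ s ∨ ∃ c ∈ cs, y ∈ g c := by
  induction cs generalizing s with
  | nil => simp
  | cons a t ih =>
      simp only [List.foldl_cons, ih, PySem.Set.mem_update, List.mem_cons]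
      constructor
      · rintro ((hy | hy) | ⟨c, hc, hy⟩)
        · exact Or.inl hy
        · exact Or.inr ⟨a, Or.inl rfl, hy⟩
        · exact Or.inr ⟨c, Or.inr hc, hy⟩
      · rintro (hy | ⟨c, (rfl | hc), hy⟩)
        · exact Or.inl (Or.inl hy)
        · exact Or.inl (Or.inr hy)
        · exact Or.inr ⟨c, hc, hy⟩


-- A-side hit test for one packet k against one channel list
def pvHit (arr : PySem.Dict Int (List (Int × Int))) (k : Int) (chans : List Int) : Bool :=
  chans.any (fun ch => decide (k ∈ (PySem.Dict.ofList ((arr.get? ch).getD [])).keys))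

-- A's guard 'if k in coverage' reads only the key set, which the loop never changes
theorem pv_guard_static (ks : List Int) (c0 : PySem.Dict Int Int) :
    ∀ c : PySem.Dict Int Int, (∀ k, c.contains k = c0.contains k) →
    ks.foldl (fun c k => if c.contains k then c.modify k 0 (· + 1) else c) c
      = ks.foldl (fun c k => if c0.contains k then c.modify k 0 (· + 1) else c) c := by
  induction ks with
  | nil => intro c _; rfl
  | cons a t ih =>
      intro c h
      simp only [List.foldl_cons, h a]
      by_cases hc : c0.contains a = true
      · simp only [hc, if_true]
        refine ih _ (fun k => ?_)
        rw [PySem.Dict.contains_modify, h k]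
        by_cases hk : k = a
        · subst hk; simp [hc]
        · simp [hk]
      · simp only [hc, Bool.false_eq_true, if_false]
        exact ih c h

-- one A step: keys unchanged, each coverage key bumped iff the subarray hits it
theorem pv_A_step (arr : PySem.Dict Int (List (Int × Int))) (chans : List Int)
    (cov : PySem.Dict Int Int) :
    ((chans.foldl (fun s ch => PySem.Set.update s (PySem.Dict.ofList ((arr.get? ch).getD [])).keys) PySem.Set.empty).foldl
        (fun c k => if c.contains k then c.modify k 0 (· + 1) else c) cov).keys = cov.keys
    ∧ ∀ k : Int,
      ((chans.foldl (fun s ch => PySem.Set.update s (PySem.Dict.ofList ((arr.get? ch).getD [])).keys) PySem.Set.empty).foldl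
        (fun c k => if c.contains k then c.modify k 0 (· + 1) else c) cov).getD k 0
      = cov.getD k 0 + (if k ∈ cov.keys ∧ pvHit arr k chans then 1 else 0) := by
  set g : Int → List Int := fun ch => (PySem.Dict.ofList ((arr.get? ch).getD [])).keys with hg
  set present : PySem.Set Int := chans.foldl (fun s ch => PySem.Set.update s (g ch)) PySem.Set.empty with hp
  have hpn : present.Nodup := pv_foldl_update_nodup g chans PySem.Set.empty (by simp [PySem.Set.empty])
  have hmem : ∀ x : Int, x ∈ present ↔ pvHit arr x chans = true := by
    intro x
    rw [hp, pv_foldl_update_mem]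
    simp [PySem.Set.empty, pvHit, List.any_eq_true, hg]
  rw [pv_guard_static present cov cov (fun _ => rfl),
      PySem.List.foldl_if_eq_foldl_filter]
  have hfn : (present.filter (fun k => cov.contains k)).Nodup := List.Nodup.filter _ hpn
  have hfm : ∀ x : Int, x ∈ present.filter (fun k => cov.contains k)
      ↔ x ∈ cov.keys ∧ pvHit arr x chans = true := by
    intro x
    rw [List.mem_filter, PySem.Dict.contains_iff_mem_keys, hmem x]
    exact and_comm
  constructor
  · rw [PySem.Dict.keys_foldl_modify _ _ (fun _ _ => (· + 1))]
    exact pv_update_of_subset _ _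
      (fun x hx => (PySem.Dict.contains_iff_mem_keys _ _).mp (List.mem_filter.mp hx).2)
  · intro k
    rw [PySem.Dict.getD_foldl_modify_add_one]
    congr 1
    by_cases hk : k ∈ cov.keys ∧ pvHit arr k chans = true
    · rw [List.count_eq_one_of_mem hfn ((hfm k).mpr hk), if_pos hk]
      norm_num
    · rw [List.count_eq_zero_of_not_mem (fun hx => hk ((hfm k).mp hx)), if_neg hk]
      rfl

-- the whole A loop: keys unchanged, each key's value counts the hitting subarrays
theorem pv_A_loop (arr : PySem.Dict Int (List (Int × Int))) (items : List (Int × List Int)) :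
    ∀ cov : PySem.Dict Int Int,
    (items.foldl (fun cov p =>
        (p.2.foldl (fun s ch => PySem.Set.update s (PySem.Dict.ofList ((arr.get? ch).getD [])).keys) PySem.Set.empty).foldl
          (fun c k => if c.contains k then c.modify k 0 (· + 1) else c) cov) cov).keys = cov.keys
    ∧ ∀ k : Int,
      (items.foldl (fun cov p =>
        (p.2.foldl (fun s ch => PySem.Set.update s (PySem.Dict.ofList ((arr.get? ch).getD [])).keys) PySem.Set.empty).foldl
          (fun c k => if c.contains k then c.modify k 0 (· + 1) else c) cov) cov).getD k 0
      = cov.getD k 0 + (if k ∈ cov.keys then (items.countP (fun p => pvHit arr k p.2) : Int) else 0) := by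
  induction items with
  | nil => intro cov; exact ⟨rfl, fun k => by by_cases h : k ∈ cov.keys <;> simp [h]⟩
  | cons q t ih =>
      intro cov
      obtain ⟨hstepk, hstepv⟩ := pv_A_step arr q.2 cov
      obtain ⟨ihk, ihv⟩ := ih ((q.2.foldl (fun s ch => PySem.Set.update s (PySem.Dict.ofList ((arr.get? ch).getD [])).keys) PySem.Set.empty).foldl
          (fun c k => if c.contains k then c.modify k 0 (· + 1) else c) cov)
      constructor
      · simpa only [List.foldl_cons, hstepk] using ihk
      · intro k
        simp only [List.foldl_cons]
        rw [ihv k, hstepv k, hstepk]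
        by_cases hk : k ∈ cov.keys
        · simp only [hk, if_pos, true_and, List.countP_cons]
          by_cases hh : pvHit arr k q.2 = true
          · simp [hh]
            ring
          · simp [hh]
        · simp [hk]

-- B's insert fold: lookup of an inserted key yields its (key-determined) value
theorem pv_B_getD (f : Int → Int) (pks : List Int) (k : Int) :
    ∀ d : PySem.Dict Int Int,
    (pks.foldl (fun d k => d.insert k (f k)) d).getD k 0 = if k ∈ pks then f k else d.getD k 0 := by
  induction pks with
  | nil => intro d; simp
  | cons a t ih =>
      intro d
      simp only [List.foldl_cons, ih, PySem.Dict.getD_insert, List.mem_cons]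
      by_cases hka : k = a
      · subst hka
        by_cases hkt : k ∈ t <;> simp [hkt]
      · simp [hka]

theorem pv_main (arrivals : List (Int × List (Int × Int))) (subarrays : List (Int × List Int)) (pks : List Int) :
    (let arr := PySem.Dict.ofList arrivals
     let subs := PySem.Dict.ofList subarrays
     let cov0 : PySem.Dict Int Int := pks.foldl (fun d k => d.insert k 0) PySem.Dict.empty
     (subs.items.foldl (fun cov p =>
        (p.2.foldl (fun s ch => PySem.Set.update s (PySem.Dict.ofList ((arr.get? ch).getD [])).keys) PySem.Set.empty).foldl
          (fun c k => if c.contains k then c.modify k 0 (· + 1) else c) cov) cov0).items)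
    = (let arr := PySem.Dict.ofList arrivals
       let subs := PySem.Dict.ofList subarrays
       let by_packet : PySem.Dict Int (PySem.Set Int) :=
         arr.items.foldl (fun d p =>
           (PySem.Dict.ofList p.2).keys.foldl
             (fun d k => d.modify k PySem.Set.empty (fun s => PySem.Set.add s p.1)) d) PySem.Dict.empty
       (pks.foldl (fun d k =>
           d.insert k
             ((subs.values.countP (fun chans =>
                 chans.any (fun ch => (by_packet.getD k PySem.Set.empty).contains ch)) : Int)))
         PySem.Dict.empty).items) := by
  simp only []
  set arr := PySem.Dict.ofList arrivals with harr
  set subs := PySem.Dict.ofList subarrays with hsubs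
  set cov0 : PySem.Dict Int Int := pks.foldl (fun d k => d.insert k 0) PySem.Dict.empty with hcov0
  set fB : Int → Int := fun k =>
      ((subs.values.countP (fun chans =>
          chans.any (fun ch =>
            ((arr.items.foldl (fun d p =>
               (PySem.Dict.ofList p.2).keys.foldl
                 (fun d k => d.modify k PySem.Set.empty (fun s => PySem.Set.add s p.1)) d)
               PySem.Dict.empty).getD k PySem.Set.empty).contains ch)) : Int)) with hfB
  -- key lists agree
  have hk0 : cov0.keys = PySem.Set.update PySem.Dict.empty.keys pks :=
    PySem.Dict.keys_foldl_insert pks (fun _ _ => 0) _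
  have hkB : (pks.foldl (fun d k => d.insert k (fB k)) PySem.Dict.empty).keys
      = PySem.Set.update PySem.Dict.empty.keys pks :=
    PySem.Dict.keys_foldl_insert pks (fun _ k => fB k) _
  have hnd0 : cov0.keys.Nodup :=
    PySem.Dict.nodup_keys_foldl_insert pks (fun _ _ => 0) _ PySem.Dict.nodup_keys_empty
  obtain ⟨hAK, hAV⟩ := pv_A_loop arr subs.items cov0
  have hndA : (subs.items.foldl (fun cov p =>
        (p.2.foldl (fun s ch => PySem.Set.update s (PySem.Dict.ofList ((arr.get? ch).getD [])).keys) PySem.Set.empty).foldl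
          (fun c k => if c.contains k then c.modify k 0 (· + 1) else c) cov) cov0).keys.Nodup := by
    rw [hAK]; exact hnd0
  have hndB : (pks.foldl (fun d k => d.insert k (fB k)) PySem.Dict.empty).keys.Nodup :=
    PySem.Dict.nodup_keys_foldl_insert pks (fun _ k => fB k) _ PySem.Dict.nodup_keys_empty
  rw [PySem.Dict.items_eq_map_keys _ hndA 0, PySem.Dict.items_eq_map_keys _ hndB 0,
      hAK, hkB, ← hk0]
  refine List.map_congr_left (fun k hk => ?_)
  have hkpks : k ∈ pks := by
    rw [hk0] at hk
    rcases (PySem.Set.mem_update _ _ _).mp hk with h | h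
    · rw [PySem.Dict.keys_empty] at h; simp at h
    · exact h
  have hz : cov0.getD k 0 = 0 := by
    rw [hcov0, pv_B_getD (fun _ => 0) pks k]
    simp
  rw [hAV k, pv_B_getD fB pks k, if_pos hkpks, hz, if_pos hk, zero_add]
  -- fB k is the same count as A's
  rw [hfB]
  beta_reduce
  congr 1
  rw [show subs.values = subs.items.map (·.2) from rfl, List.countP_map]
  congr 1
  refine List.countP_congr (fun p _ => ?_)
  have hfun : (fun ch => ((arr.items.foldl (fun d p =>
        (PySem.Dict.ofList p.2).keys.foldl
          (fun d k => d.modify k PySem.Set.empty (fun s => PySem.Set.add s p.1)) d)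
        PySem.Dict.empty).getD k PySem.Set.empty).contains ch)
      = (fun ch => decide (k ∈ (PySem.Dict.ofList ((arr.get? ch).getD [])).keys)) :=
    funext (fun ch => pv_bp_contains arr (PySem.Dict.nodup_keys_ofList arrivals) k ch)
  simp only [Function.comp, pvHit, hfun]

theorem pv_ports_eq (arrivals : List (Int × List (Int × Int))) (subarrays : List (Int × List Int)) (packet_indices : Option (List Int)) :
    packet_coverage_counts arrivals subarrays packet_indices
      = packet_coverage_counts_alt arrivals subarrays packet_indices := by
  unfold packet_coverage_counts packet_coverage_counts_alt
  cases packet_indices with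
  | some l => exact pv_main arrivals subarrays l
  | none =>
      simp only []
      have hkeys : ((PySem.Dict.ofList arrivals).items.foldl (fun d p =>
          (PySem.Dict.ofList p.2).keys.foldl
            (fun d k => d.modify k PySem.Set.empty (fun s => PySem.Set.add s p.1)) d)
          PySem.Dict.empty).keys
        = (PySem.Dict.ofList arrivals).values.foldl
            (fun s ch_map => PySem.Set.update s (PySem.Dict.ofList ch_map).keys) PySem.Set.empty := by
        rw [pv_bp_keys,
            show (PySem.Dict.ofList arrivals).values = (PySem.Dict.ofList arrivals).items.map (·.2) from rfl,
            List.foldl_map]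
        rfl
      rw [hkeys]
      exact pv_main arrivals subarrays _

-- ===== VERDICT (by name: the statement is the Claim_ definition above) =====
theorem packet_coverage_counts_spec : Claim_equal_packet_coverage_counts := by
  intro arrivals subarrays packet_indices _
  unfold Spec_packet_coverage_counts
  exact pv_ports_eq arrivals subarrays packet_indices
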